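-- pv_equiv track=rewrite | github.com/KatarinaLouise/CSALGCM | Emperor/endoftheworld.py | solve
-- ===== SOURCE A (Python) =====
-- def solve(n, nums):
--     max = -1000
--     sum_total, count = 0, 0
--
--     for i in nums:
--         # for computing sum
--         if i > 0:
--             sum_total += i
--             count += 1
--         # for getting max
--         if i > max:
--             max = i
--     if count == 0:
--         sum_total = max
--         count = 1
--     return count, sum_total
-- ===== SOURCE B (Python) =====
-- def solve(n, nums):
--     srt = sorted(nums, reverse=True)
--     count, total = 0, 0
--     for x in srt:
--         if x <= 0:
--             break
--         count += 1
--         total += x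
--     if count:
--         return count, total
--     if srt and srt[0] > -1000:
--         return 1, srt[0]
--     return 1, -1000
-- ===== Notes on version B (the rewrite author's own statement) =====
-- stated objective: alternative
-- what changed: Replaces A's single fused three-accumulator pass (running max, positive sum, positive count) with a sort-based algorithm: sort descending, then sum/count the prefix of positives with an early break; if that prefix is empty the head of the sorted list is the max (floored at -1000 as the task's sentinel).
import Mathlib
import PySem

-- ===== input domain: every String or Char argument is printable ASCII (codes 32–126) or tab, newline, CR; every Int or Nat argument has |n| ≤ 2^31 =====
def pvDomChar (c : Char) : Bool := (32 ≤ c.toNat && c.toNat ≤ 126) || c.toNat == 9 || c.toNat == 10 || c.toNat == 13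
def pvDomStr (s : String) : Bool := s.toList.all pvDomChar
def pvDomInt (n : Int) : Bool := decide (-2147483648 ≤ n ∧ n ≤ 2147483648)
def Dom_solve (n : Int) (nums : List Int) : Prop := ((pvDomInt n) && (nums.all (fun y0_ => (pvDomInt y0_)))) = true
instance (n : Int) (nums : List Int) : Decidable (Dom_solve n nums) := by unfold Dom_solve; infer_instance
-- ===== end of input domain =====

-- B replaces A's fused three-accumulator pass by sort-descending + early-break prefix scan (objective: alternative).

-- ===== PORT A =====
-- state = (max, sum_total, count), updated exactly as A's loop body does
def solve (n : Int) (nums : List Int) : Int × Int :=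
  let st := nums.foldl (fun (st : Int × Int × Int) i =>
    let mx := st.1
    let s := st.2.1
    let c := st.2.2
    let s := if i > 0 then s + i else s
    let c := if i > 0 then c + 1 else c
    let mx := if i > mx then i else mx
    (mx, s, c)) (-1000, 0, 0)
  if st.2.2 = 0 then (1, st.1) else (st.2.2, st.2.1)

-- ===== PORT B =====
-- Source B's 'for x in srt: if x <= 0: break; count += 1; total += x' as stop-at-first-nonpositive recursion
def solveLoop : List Int → Int → Int → Int × Int
  | [], c, t => (c, t)
  | x :: xs, c, t => if x ≤ 0 then (c, t) else solveLoop xs (c + 1) (t + x)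

def solve_alt (n : Int) (nums : List Int) : Int × Int :=
  let srt := PySem.List.sorted nums (fun x => x) true
  let ct := solveLoop srt 0 0
  if ct.1 ≠ 0 then ct
  else
    -- 'if srt and srt[0] > -1000: return 1, srt[0]; return 1, -1000'
    match srt with
    | [] => (1, -1000)
    | x :: _ => if x > -1000 then (1, x) else (1, -1000)

-- ===== PRECONDITION & SPEC =====
def Spec_solve (n : Int) (nums : List Int) (out : Int × Int) : Prop := out = solve_alt n nums
instance (n : Int) (nums : List Int) (out : Int × Int) : Decidable (Spec_solve n nums out) := by unfold Spec_solve; infer_instance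

-- ===== CLAIM (what is proved, stated in full; the proofs are below) =====
def Claim_equal_solve : Prop := ∀ (n : Int) (nums : List Int), Dom_solve n nums → Spec_solve n nums (solve n nums)

-- ===== LEMMAS AND PROOFS =====

-- A's fold, with generalized initial state: max component is a running max,
-- sum/count components accumulate over the positive elements.
theorem solve_fold_char (nums : List Int) (mx0 s0 c0 : Int) :
    nums.foldl (fun (st : Int × Int × Int) i =>
      let mx := st.1
      let s := st.2.1
      let c := st.2.2
      let s := if i > 0 then s + i else s
      let c := if i > 0 then c + 1 else c
      let mx := if i > mx then i else mx
      (mx, s, c)) (mx0, s0, c0)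
    = (nums.foldl max mx0,
       s0 + (nums.filter (fun i => i > 0)).sum,
       c0 + ((nums.filter (fun i => i > 0)).length : Int)) := by
  induction nums generalizing mx0 s0 c0 with
  | nil => simp
  | cons a t ih =>
    have hm : (if a > mx0 then a else mx0) = max mx0 a := by omega
    simp only [List.foldl_cons, List.filter_cons]
    by_cases ha : a > 0
    · simp only [ha, if_pos, decide_true, ih, hm, List.sum_cons, List.length_cons,
        Prod.mk.injEq]
      refine ⟨by trivial, by omega, by push_cast; omega⟩
    · simp [ha, ih, hm]

-- B's early-break loop on a descending list sums/counts exactly the positive elements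
theorem solveLoop_char (l : List Int) (hl : l.Pairwise (fun a b => b ≤ a)) (c t : Int) :
    solveLoop l c t = (c + ((l.filter (fun i => i > 0)).length : Int),
                       t + (l.filter (fun i => i > 0)).sum) := by
  induction l generalizing c t with
  | nil => simp [solveLoop]
  | cons x xs ih =>
    rcases List.pairwise_cons.mp hl with ⟨hx, hxs⟩
    by_cases h : x ≤ 0
    · have hnil : xs.filter (fun i => i > 0) = [] := by
        rw [List.filter_eq_nil_iff]
        intro y hy
        have := hx y hy
        simp only [decide_eq_true_eq]
        omega
      simp [solveLoop, h, hnil, show ¬ (x > 0) by omega]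
    · have hd : decide (x > 0) = true := by simp; omega
      simp only [solveLoop, if_neg h, ih hxs, List.filter_cons, hd, if_pos]
      simp only [List.length_cons, List.sum_cons, Prod.mk.injEq]
      constructor <;> push_cast <;> omega

theorem foldl_max_mem (l : List Int) (a : Int) :
    l.foldl max a = a ∨ l.foldl max a ∈ l := by
  induction l generalizing a with
  | nil => left; rfl
  | cons b t ih =>
    simp only [List.foldl_cons]
    rcases ih (max a b) with h | h
    · rcases max_choice a b with hm | hm
      · left; rw [h, hm]
      · right; rw [h, hm]; exact List.mem_cons_self
    · right; exact List.mem_cons_of_mem _ h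

theorem le_foldl_max' (l : List Int) (a : Int) :
    a ≤ l.foldl max a ∧ ∀ y ∈ l, y ≤ l.foldl max a :=
  PySem.List.le_foldl_max l a

-- ===== VERDICT (by name: the statement is the Claim_ definition above) =====
theorem solve_spec : Claim_equal_solve := by
  intro n nums _
  show solve n nums = solve_alt n nums
  have hperm : (PySem.List.sorted nums (fun x => x) true).Perm nums :=
    PySem.List.sorted_perm nums (fun x => x) true
  have hpw : (PySem.List.sorted nums (fun x => x) true).Pairwise (fun a b => b ≤ a) :=
    PySem.List.sorted_pairwise_rev (xs := nums) (key := fun x => x)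
  have hfp : ((PySem.List.sorted nums (fun x => x) true).filter (fun i => i > 0)).Perm
      (nums.filter (fun i => i > 0)) := hperm.filter _
  unfold solve solve_alt
  simp only [solve_fold_char, solveLoop_char _ hpw, hfp.length_eq, hfp.sum_eq, zero_add, ne_eq]
  by_cases hc : ((nums.filter (fun i => i > 0)).length : Int) = 0
  · rw [if_pos hc, if_neg (not_not_intro hc)]
    rcases hs : PySem.List.sorted nums (fun x => x) true with _ | ⟨x, t⟩
    · have hnil : nums = [] := (PySem.List.sorted_eq_nil_iff nums (fun x => x) true).mp hs
      subst hnil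
      rfl
    · show (1, nums.foldl max (-1000)) = if x > -1000 then (1, x) else (1, -1000)
      have hxmem : x ∈ nums := by
        rw [← PySem.List.mem_sorted (xs := nums) (key := fun x => x) (rev := true), hs]
        exact List.mem_cons_self
      have hxmax : ∀ y ∈ nums, y ≤ x := fun y hy =>
        PySem.List.key_head_sorted_rev_ge (xs := nums) (key := fun x => x) hs y hy
      have h1 : (-1000 : Int) ≤ nums.foldl max (-1000) := (le_foldl_max' nums (-1000)).1
      have h2 : x ≤ nums.foldl max (-1000) := (le_foldl_max' nums (-1000)).2 x hxmem
      have h3 : nums.foldl max (-1000) = -1000 ∨ nums.foldl max (-1000) ∈ nums :=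
        foldl_max_mem nums (-1000)
      by_cases hx : x > -1000
      · have hM : nums.foldl max (-1000) = x := by
          rcases h3 with h | h
          · omega
          · have := hxmax _ h; omega
        rw [if_pos hx, hM]
      · have hM : nums.foldl max (-1000) = -1000 := by
          rcases h3 with h | h
          · exact h
          · have := hxmax _ h; omega
        rw [if_neg hx, hM]
  · rw [if_neg hc, if_pos hc]
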